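-- pv_equiv track=rewrite | github.com/SvenBroeckling/gitexplorer | src/gitexplorer/file_search.py | _seq_score
-- ===== SOURCE A (Python) =====
-- def _seq_score(query: str, text: str) -> int:
--     """Return a positive score when *query* is a subsequence of *text*, else -1.
--
--     Higher score = tighter match (consecutive runs, prefix matches).
--     """
--     qi = 0
--     score = 0
--     prev = -2
--
--     for ti, tc in enumerate(text):
--         if qi >= len(query):
--             break
--         if tc == query[qi]:
--             if ti == prev + 1:          # consecutive bonus
--                 score += 3
--             if ti == 0:                 # prefix bonus
--                 score += 4
--             elif text[ti - 1] in "-_./ ":   # word-boundary bonus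
--                 score += 2
--             score += 1
--             prev = ti
--             qi += 1
--
--     return score if qi == len(query) else -1
-- ===== SOURCE B (Python) =====
-- def _seq_score(query: str, text: str) -> int:
--     n = len(text)
--     # Subsequence automaton: nxt[i] maps a char c to the smallest j >= i
--     # with text[j] == c; built backwards, each table extends the next one.
--     nxt = [None] * (n + 1)
--     nxt[n] = {}
--     for i in range(n - 1, -1, -1):
--         d = dict(nxt[i + 1])
--         d[text[i]] = i
--         nxt[i] = d
--     # Matching is pure table lookups, no scanning of text.
--     score = 0
--     prev = -2
--     start = 0
--     for qc in query:
--         idx = nxt[start].get(qc)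
--         if idx is None:
--             return -1
--         if idx == prev + 1:
--             score += 3
--         if idx == 0:
--             score += 4
--         elif text[idx - 1] in "-_./ ":
--             score += 2
--         score += 1
--         prev = idx
--         start = idx + 1
--     return score
-- ===== Notes on version B (the rewrite author's own statement) =====
-- stated objective: alternative
-- what changed: Replaces A's interleaved greedy scan over text with a precomputed subsequence automaton (per-position next-occurrence dictionaries built backwards over text); matching then consists of O(1) dictionary lookups per query character instead of scanning.
import Mathlib
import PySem

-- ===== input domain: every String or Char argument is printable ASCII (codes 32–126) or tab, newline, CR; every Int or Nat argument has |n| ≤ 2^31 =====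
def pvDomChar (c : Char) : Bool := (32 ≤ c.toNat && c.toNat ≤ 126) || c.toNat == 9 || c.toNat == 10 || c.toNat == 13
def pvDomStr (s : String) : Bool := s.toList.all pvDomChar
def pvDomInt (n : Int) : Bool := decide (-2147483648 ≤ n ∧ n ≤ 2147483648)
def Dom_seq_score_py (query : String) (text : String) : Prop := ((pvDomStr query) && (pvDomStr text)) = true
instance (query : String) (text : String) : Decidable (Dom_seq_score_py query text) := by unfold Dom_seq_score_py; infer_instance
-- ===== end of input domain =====

-- header: B replaces A's greedy scan with a precomputed subsequence automaton
-- (per-position next-occurrence dictionaries); return value only, no side effects.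

-- ===== PORT A =====
-- Python's "text[ti-1] in \"-_./ \"" (only reached with ti ≥ 1, so the index is in range)
def pvBoundary (tl : List Char) (ti : Int) : Bool :=
  match PySem.List.pyGet? tl (ti - 1) with
  | some c => ['-', '_', '.', '/', ' '].contains c
  | none => false

-- the score increment of one matched position (the same three += lines in A and B)
def pvStepBonus (tl : List Char) (ti : Int) (prev : Int) : Int :=
  (if ti = prev + 1 then 3 else 0) +
  (if ti = 0 then 4 else if pvBoundary tl ti then 2 else 0) + 1

-- enumerate(text) pairs starting at index s
def pvEnumFrom (s : Int) : List Char → List (Int × Char)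
  | [] => []
  | c :: cs => (s, c) :: pvEnumFrom (s + 1) cs

-- A's single interleaved loop: remaining query, prev, score; break when query exhausted
def pvLoopA (tl : List Char) : List (Int × Char) → List Char → Int → Int → Int
  | _, [], _, score => score
  | [], _ :: _, _, _ => -1
  | (ti, tc) :: rest, qc :: qr, prev, score =>
      if tc = qc then
        pvLoopA tl rest qr ti (score + pvStepBonus tl ti prev)
      else
        pvLoopA tl rest (qc :: qr) prev score

def seq_score_py (query : String) (text : String) : Int :=
  pvLoopA text.toList (pvEnumFrom 0 text.toList) query.toList (-2) 0

-- ===== PORT B =====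
-- the automaton tables, built backwards over text (Python's i from n-1 downto 0):
-- entry k of (pvBuildNxt tl s) is nxt[s+k], mapping c to the least absolute index
-- j ≥ s+k with text[j] = c; the last entry is the empty dict nxt[n].
def pvBuildNxt : List Char → Int → List (PySem.Dict Char Int)
  | [], _ => [PySem.Dict.empty]
  | c :: cs, i =>
      let rest := pvBuildNxt cs (i + 1)
      (PySem.Dict.insert (rest.headD PySem.Dict.empty) c i) :: rest

-- B's matching loop: one dictionary lookup per query character.
-- 0 ≤ start ≤ n always holds, so the out-of-range (none) index case is
-- unreachable; folding it into the no-match -1 branch changes no behaviour.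
def pvAutoLoop (tl : List Char) (nxt : List (PySem.Dict Char Int)) :
    List Char → Int → Int → Int → Int
  | [], _, _, score => score
  | qc :: qr, start, prev, score =>
      match (PySem.List.pyGet? nxt start).bind (fun d => PySem.Dict.get? d qc) with
      | none => -1
      | some idx => pvAutoLoop tl nxt qr (idx + 1) idx (score + pvStepBonus tl idx prev)

def seq_score_py_alt (query : String) (text : String) : Int :=
  pvAutoLoop text.toList (pvBuildNxt text.toList 0) query.toList 0 (-2) 0

-- ===== PRECONDITION & SPEC =====
def Spec_seq_score_py (query : String) (text : String) (out : Int) : Prop := out = seq_score_py_alt query text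
instance (query : String) (text : String) (out : Int) : Decidable (Spec_seq_score_py query text out) := by unfold Spec_seq_score_py; infer_instance

-- ===== CLAIM (what is proved, stated in full; the proofs are below) =====
def Claim_equal_seq_score_py : Prop := ∀ (query : String) (text : String), Dom_seq_score_py query text → Spec_seq_score_py query text (seq_score_py query text)

-- ===== LEMMAS AND PROOFS =====
-- proof-internal reference recursion: the greedy leftmost match, phrased with an
-- explicit "first index of c at or after start" function; both ports are reduced to it.
def pvFindIdx : List Char → Char → Int
  | [], _ => -1
  | x :: xs, c =>
      if x = c then 0
      else
        let r := pvFindIdx xs c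
        if r = -1 then -1 else r + 1

def pvFindRec (tl : List Char) : List Char → Int → Int → Int → Int
  | [], _, _, score => score
  | qc :: qr, start, prev, score =>
      let r := pvFindIdx (List.drop start.toNat tl) qc
      if r = -1 then -1
      else pvFindRec tl qr (start + r + 1) (start + r) (score + pvStepBonus tl (start + r) prev)

theorem pvFindIdx_ge_neg_one (l : List Char) (c : Char) : -1 ≤ pvFindIdx l c := by
  induction l with
  | nil => simp [pvFindIdx]
  | cons x xs ih =>
    simp only [pvFindIdx]
    split_ifs <;> omega

theorem pvFindIdx_lt_length (l : List Char) (c : Char) : pvFindIdx l c < l.length := by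
  induction l with
  | nil => simp [pvFindIdx]
  | cons x xs ih =>
    simp only [pvFindIdx, List.length_cons]
    split_ifs <;> omega

-- A's loop equals the reference recursion
theorem pvLoopA_step (tl : List Char) (qc : Char) (qr : List Char) :
    ∀ (l : List Char) (s prev score : Int),
      pvLoopA tl (pvEnumFrom s l) (qc :: qr) prev score =
        (let r := pvFindIdx l qc
         if r = -1 then -1
         else pvLoopA tl (pvEnumFrom (s + r + 1) (List.drop (r + 1).toNat l)) qr (s + r)
                (score + pvStepBonus tl (s + r) prev)) := by
  intro l
  induction l with
  | nil => intro s prev score; simp [pvEnumFrom, pvLoopA, pvFindIdx]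
  | cons x xs ih =>
    intro s prev score
    simp only [pvEnumFrom, pvLoopA, pvFindIdx]
    by_cases hx : x = qc
    · simp [hx]
    · simp only [hx, if_false, ih (s + 1)]
      have hge := pvFindIdx_ge_neg_one xs qc
      by_cases hr : pvFindIdx xs qc = -1
      · simp [hr]
      · have h0 : 0 ≤ pvFindIdx xs qc := by omega
        have hne : ¬ (pvFindIdx xs qc + 1 = -1) := by omega
        simp only [hr, if_false, hne]
        have hdrop : (pvFindIdx xs qc + 1 + 1).toNat = (pvFindIdx xs qc + 1).toNat + 1 := by omega
        rw [hdrop]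
        simp only [List.drop_succ_cons]
        ring_nf

theorem pvA_eq_ref (tl : List Char) :
    ∀ (q : List Char) (s prev score : Int), 0 ≤ s →
      pvLoopA tl (pvEnumFrom s (List.drop s.toNat tl)) q prev score =
        pvFindRec tl q s prev score := by
  intro q
  induction q with
  | nil => intro s prev score _; simp [pvLoopA, pvFindRec]
  | cons qc qr ih =>
    intro s prev score hs
    rw [pvLoopA_step]
    simp only [pvFindRec]
    have hge := pvFindIdx_ge_neg_one (List.drop s.toNat tl) qc
    by_cases hr : pvFindIdx (List.drop s.toNat tl) qc = -1
    · simp [hr]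
    · have h0 : 0 ≤ pvFindIdx (List.drop s.toNat tl) qc := by omega
      set r := pvFindIdx (List.drop s.toNat tl) qc with hrdef
      simp only [hr, if_false]
      have hd : List.drop (r + 1).toNat (List.drop s.toNat tl) = List.drop (s + r + 1).toNat tl := by
        rw [List.drop_drop]
        congr 1
        omega
      rw [hd, ih (s + r + 1) (s + r) (score + pvStepBonus tl (s + r) prev) (by omega)]

-- the automaton table has one entry per suffix of tl plus the empty final entry
theorem pvBuildNxt_ne_nil (l : List Char) (s : Int) : pvBuildNxt l s ≠ [] := by
  cases l <;> simp [pvBuildNxt]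

-- lookup in table entry k = leftmost occurrence of c in the suffix from k (absolute base s)
theorem pvBuildNxt_get (c : Char) :
    ∀ (l : List Char) (s k : Int), 0 ≤ k → k ≤ l.length →
      ((PySem.List.pyGet? (pvBuildNxt l s) k).bind (fun d => PySem.Dict.get? d c)) =
        (let r := pvFindIdx (List.drop k.toNat l) c
         if r = -1 then none else some (s + k + r)) := by
  intro l
  induction l with
  | nil =>
    intro s k h0 hlen
    simp only [List.length_nil, Nat.cast_zero] at hlen
    have hk : k = 0 := by omega
    subst hk
    simp [pvBuildNxt, pvFindIdx, PySem.Dict.get?_empty]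
  | cons x xs ih =>
    intro s k h0 hlen
    by_cases hk : k = 0
    · subst hk
      simp only [pvBuildNxt, PySem.List.pyGet?_zero_cons, Option.bind_some, Int.toNat_zero,
        List.drop_zero]
      rw [PySem.Dict.get?_insert]
      by_cases hx : c = x
      · simp [hx, pvFindIdx]
      · have hx' : ¬ x = c := fun h => hx h.symm
        simp only [hx, if_false]
        conv_rhs => rw [pvFindIdx]
        simp only [hx', if_false]
        -- relate headD to pyGet? 0
        have h00 : PySem.List.pyGet? (pvBuildNxt xs (s + 1)) 0 =
            some ((pvBuildNxt xs (s + 1)).headD PySem.Dict.empty) := by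
          cases hxs : pvBuildNxt xs (s + 1) with
          | nil => exact absurd hxs (pvBuildNxt_ne_nil xs (s + 1))
          | cons d ds => simp
        have := ih (s + 1) 0 (by omega) (by omega)
        rw [h00] at this
        simp only [Option.bind_some, Int.toNat_zero, List.drop_zero] at this
        rw [this]
        have hge := pvFindIdx_ge_neg_one xs c
        by_cases hr : pvFindIdx xs c = -1
        · simp [hr]
        · have : ¬ (pvFindIdx xs c + 1 = -1) := by omega
          simp only [hr, if_false, this]
          congr 1
          ring
    · -- k ≥ 1: step into the tail table
      have hk1 : 1 ≤ k := by omega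
      have hstep : PySem.List.pyGet? (pvBuildNxt (x :: xs) s) k =
          PySem.List.pyGet? (pvBuildNxt xs (s + 1)) (k - 1) := by
        obtain ⟨m, hm⟩ : ∃ m : Nat, k = (m : Int) + 1 := ⟨(k - 1).toNat, by omega⟩
        rw [hm]
        have h1 : (m : Int) + 1 - 1 = (m : Int) := by ring
        rw [h1]
        simp only [pvBuildNxt]
        exact PySem.List.pyGet?_cons_succ _ _ _
      rw [hstep, ih (s + 1) (k - 1) (by omega) (by simp at hlen; omega)]
      have hdrop : List.drop (k - 1).toNat xs = List.drop k.toNat (x :: xs) := by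
        have : k.toNat = (k - 1).toNat + 1 := by omega
        rw [this, List.drop_succ_cons]
      rw [hdrop]
      have hge := pvFindIdx_ge_neg_one (List.drop k.toNat (x :: xs)) c
      by_cases hr : pvFindIdx (List.drop k.toNat (x :: xs)) c = -1
      · simp [hr]
      · simp only [hr, if_false]
        congr 1
        ring

-- B's loop equals the reference recursion
theorem pvB_eq_ref (tl : List Char) :
    ∀ (q : List Char) (start prev score : Int), 0 ≤ start → start ≤ tl.length →
      pvAutoLoop tl (pvBuildNxt tl 0) q start prev score =
        pvFindRec tl q start prev score := by
  intro q
  induction q with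
  | nil => intro start prev score _ _; simp [pvAutoLoop, pvFindRec]
  | cons qc qr ih =>
    intro start prev score h0 hlen
    simp only [pvAutoLoop, pvFindRec]
    rw [pvBuildNxt_get qc tl 0 start h0 hlen]
    have hge := pvFindIdx_ge_neg_one (List.drop start.toNat tl) qc
    have hlt := pvFindIdx_lt_length (List.drop start.toNat tl) qc
    by_cases hr : pvFindIdx (List.drop start.toNat tl) qc = -1
    · simp [hr]
    · have hr0 : 0 ≤ pvFindIdx (List.drop start.toNat tl) qc := by omega
      set r := pvFindIdx (List.drop start.toNat tl) qc with hrdef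
      simp only [hr, if_false, zero_add]
      have hdl : (List.drop start.toNat tl).length = tl.length - start.toNat := by
        simp [List.length_drop]
      have hbound : start + r + 1 ≤ tl.length := by
        have : r < (tl.length : Int) - start := by
          rw [hdl] at hlt
          omega
        omega
      exact ih (start + r + 1) (start + r) (score + pvStepBonus tl (start + r) prev)
        (by omega) hbound

-- ===== VERDICT (by name: the statement is the Claim_ definition above) =====
theorem seq_score_py_spec : Claim_equal_seq_score_py := by
  intro query text _
  unfold Spec_seq_score_py seq_score_py seq_score_py_alt
  rw [pvB_eq_ref text.toList query.toList 0 (-2) 0 (by omega) (by positivity)]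
  have := pvA_eq_ref text.toList query.toList 0 (-2) 0 (by omega)
  simpa using this
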